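-- pv_equiv track=rewrite | github.com/anelachan/nofreelunch | assets/mining/featureextraction/PhraseFinder.py | merged_phrases
-- ===== SOURCE A (Python) =====
-- def merged_phrases(bigrams, trigrams):
--     """Merge bigrams and trigrams to remove trigrams made of bigrams."""
--     # look for bigrams that connect to another bigram,
--     # save the new tuple in a list called combined_phrases
--     combined_phrases = []
--     for bigram in bigrams:
--         other_bigrams = list(set(bigrams) - set(bigram))
--         for other_bigram in other_bigrams:
--             if bigram[1] == other_bigram[0]:
--                 trigram_tuple = (bigram[0], bigram[1], other_bigram[1])
--                 combined_phrases.append(trigram_tuple)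
--
--     final_phrases = bigrams
--     for trigram in trigrams:
--         # if the trigram is already in the list of combined phrases
--         if trigram in set(combined_phrases):
--             # add it to the final phrase list
--             final_phrases.append(trigram)
--             # remove the redundant bigrams
--             final_phrases.remove((trigram[0], trigram[1]))
--             final_phrases.remove((trigram[1], trigram[2]))
--
--     return final_phrases
-- ===== SOURCE B (Python) =====
-- def merged_phrases(bigrams, trigrams):
--     # Index the (first, second) pairs of all bigrams in a set once; a trigram is
--     # "combined" iff both its halves are bigram pairs.  Then drop the redundant
--     # bigrams in a single counted pass instead of repeated list.remove scans.
--     pairs = {(b[0], b[1]) for b in bigrams}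
--     need = {}
--     merged = []
--     for t in trigrams:
--         if len(t) == 3 and (t[0], t[1]) in pairs and (t[1], t[2]) in pairs:
--             merged.append(t)
--             need[(t[0], t[1])] = need.get((t[0], t[1]), 0) + 1
--             need[(t[1], t[2])] = need.get((t[1], t[2]), 0) + 1
--     kept = []
--     for b in bigrams:
--         if len(b) == 2 and need.get(b, 0) > 0:
--             need[b] -= 1
--         else:
--             kept.append(b)
--     return kept + merged
-- ===== Notes on version B (the rewrite author's own statement) =====
-- stated objective: faster
-- what changed: Replaces A's quadratic all-pairs bigram join (rebuilding set(bigrams) per bigram) with a single set of (first, second) bigram pairs tested directly per trigram, and replaces A's repeated list.remove scans with one counted pass that skips the consumed bigrams.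
import Mathlib
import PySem

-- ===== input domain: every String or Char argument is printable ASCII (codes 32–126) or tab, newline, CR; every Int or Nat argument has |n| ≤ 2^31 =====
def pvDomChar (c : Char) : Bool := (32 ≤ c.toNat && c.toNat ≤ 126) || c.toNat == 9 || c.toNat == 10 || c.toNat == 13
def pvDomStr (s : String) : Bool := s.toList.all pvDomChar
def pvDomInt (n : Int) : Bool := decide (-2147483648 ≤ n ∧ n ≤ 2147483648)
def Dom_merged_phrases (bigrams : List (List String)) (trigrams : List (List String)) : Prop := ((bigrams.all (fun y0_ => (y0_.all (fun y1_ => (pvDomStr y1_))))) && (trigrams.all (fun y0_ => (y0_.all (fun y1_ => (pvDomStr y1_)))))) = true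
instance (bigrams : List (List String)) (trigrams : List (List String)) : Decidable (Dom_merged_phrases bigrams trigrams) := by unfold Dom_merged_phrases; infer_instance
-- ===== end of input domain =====

-- B replaces A's quadratic all-pairs bigram join and repeated list.remove scans by a
-- pair set plus a counted one-pass skip (asymptotically faster); equivalence is about
-- the RETURN value only: Python A mutates the bigrams list in place, B does not.


-- xs[i] for a nonnegative index; the IndexError case (short tuple) is excluded by Pre_
def pvAt (xs : List String) (i : Nat) : String := PySem.List.pyGetD xs (Int.ofNat i) ""

-- ===== PORT A =====
-- combined_phrases: for each bigram, scan list(set(bigrams) - set(bigram)).  In Python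
-- '- set(bigram)' removes nothing (a tuple never equals a string), so the scanned list is
-- list(set(bigrams)); its set-iteration order only affects the ORDER of combined_phrases,
-- which is used below solely through membership, so first-occurrence order is exact.
def pvCombined (bigrams : List (List String)) : List (List String) :=
  bigrams.foldl (fun acc bigram =>
    (PySem.Set.ofList bigrams).foldl (fun acc2 other_bigram =>
      if pvAt bigram 1 = pvAt other_bigram 0 then
        acc2 ++ [[pvAt bigram 0, pvAt bigram 1, pvAt other_bigram 1]]
      else acc2) acc) []

-- the body of A's trigram loop (append the trigram, list.remove the two bigrams;
-- remove? = none is Python's ValueError, excluded by Pre_)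
def pvStepA (combined : List (List String)) (final_phrases : List (List String)) (trigram : List String) : List (List String) :=
  if (PySem.Set.ofList combined).contains trigram then
    let f1 := final_phrases ++ [trigram]
    let f2 := (PySem.List.remove? f1 [pvAt trigram 0, pvAt trigram 1]).getD f1
    (PySem.List.remove? f2 [pvAt trigram 1, pvAt trigram 2]).getD f2
  else final_phrases

def merged_phrases (bigrams : List (List String)) (trigrams : List (List String)) : List (List String) :=
  trigrams.foldl (pvStepA (pvCombined bigrams)) bigrams

-- ===== PORT B =====
-- first loop of Source B: collect matched trigrams and count the bigram pairs they consume
def pvStepNeed (pairs : PySem.Set (List String)) (st : PySem.Dict (List String) Int × List (List String)) (t : List String) : PySem.Dict (List String) Int × List (List String) :=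
  if decide (t.length = 3) && pairs.contains [pvAt t 0, pvAt t 1] && pairs.contains [pvAt t 1, pvAt t 2] then
    let need1 := st.1.insert [pvAt t 0, pvAt t 1] (st.1.getD [pvAt t 0, pvAt t 1] 0 + 1)
    let need2 := need1.insert [pvAt t 1, pvAt t 2] (need1.getD [pvAt t 1, pvAt t 2] 0 + 1)
    (need2, st.2 ++ [t])
  else st

-- second loop of Source B: keep each bigram unless a needed count consumes it
def pvStepKept (st : PySem.Dict (List String) Int × List (List String)) (b : List String) : PySem.Dict (List String) Int × List (List String) :=
  if decide (b.length = 2) && decide (st.1.getD b 0 > 0) then (st.1.insert b (st.1.getD b 0 - 1), st.2)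
  else (st.1, st.2 ++ [b])

-- first loop of Source B applied to all trigrams (need dict, merged list)
def pvNM (bigrams : List (List String)) (trigrams : List (List String)) : PySem.Dict (List String) Int × List (List String) :=
  trigrams.foldl (pvStepNeed (PySem.Set.ofList (bigrams.map (fun b => [pvAt b 0, pvAt b 1])))) (PySem.Dict.empty, [])

def merged_phrases_alt (bigrams : List (List String)) (trigrams : List (List String)) : List (List String) :=
  (bigrams.foldl pvStepKept ((pvNM bigrams trigrams).1, [])).2 ++ (pvNM bigrams trigrams).2

-- ===== PRECONDITION & SPEC =====
-- a trigram A merges: its two halves are (first, second) pairs of bigrams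
def pvMatched (bigrams : List (List String)) (t : List String) : Bool :=
  decide (t.length = 3)
    && (bigrams.map (fun b => [pvAt b 0, pvAt b 1])).contains [pvAt t 0, pvAt t 1]
    && (bigrams.map (fun b => [pvAt b 0, pvAt b 1])).contains [pvAt t 1, pvAt t 2]

-- the multiset of bigram pairs the matched trigrams remove
def pvUsed (bigrams : List (List String)) (trigrams : List (List String)) : List (List String) :=
  (trigrams.filter (pvMatched bigrams)).flatMap
    (fun t => [[pvAt t 0, pvAt t 1], [pvAt t 1, pvAt t 2]])

-- Pre_ excludes exactly the inputs where Python A raises: an IndexError when some bigram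
-- has fewer than 2 words, and a ValueError from list.remove when the matched trigrams
-- demand more copies of a bigram pair than the bigrams list contains.
def Pre_merged_phrases (bigrams : List (List String)) (trigrams : List (List String)) : Prop :=
  (∀ b ∈ bigrams, 2 ≤ b.length) ∧
  (∀ p ∈ pvUsed bigrams trigrams, (pvUsed bigrams trigrams).count p ≤ bigrams.count p)
instance (bigrams : List (List String)) (trigrams : List (List String)) : Decidable (Pre_merged_phrases bigrams trigrams) := by unfold Pre_merged_phrases; infer_instance

def pvWitness_merged_phrases : List (List String) × List (List String) :=
  ([["a", "b"], ["b", "c"]], [["a", "b", "c"]])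

def Spec_merged_phrases (bigrams : List (List String)) (trigrams : List (List String)) (out : List (List String)) : Prop := out = merged_phrases_alt bigrams trigrams
instance (bigrams : List (List String)) (trigrams : List (List String)) (out : List (List String)) : Decidable (Spec_merged_phrases bigrams trigrams out) := by unfold Spec_merged_phrases; infer_instance

-- ===== CLAIM (what is proved, stated in full; the proofs are below) =====
def Claim_equal_merged_phrases : Prop := ∀ (bigrams : List (List String)) (trigrams : List (List String)), Dom_merged_phrases bigrams trigrams → Pre_merged_phrases bigrams trigrams → Spec_merged_phrases bigrams trigrams (merged_phrases bigrams trigrams)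


-- ===== LEMMAS AND PROOFS =====

-- pointwise increment / decrement of a count function
def pvInc (f : List String → Int) (p : List String) : List String → Int :=
  fun q => if q = p then f q + 1 else f q
def pvDec (f : List String → Int) (p : List String) : List String → Int :=
  fun q => if q = p then f q - 1 else f q

-- the pure form of B's second loop: skip f b copies of each length-2 element b
def pvConsume : List (List String) → (List String → Int) → List (List String)
  | [], _ => []
  | b :: bs, f => if b.length = 2 ∧ f b > 0 then pvConsume bs (pvDec f b) else b :: pvConsume bs f

theorem pvConsume_nonpos (bs : List (List String)) (f : List String → Int)
    (h : ∀ b, f b ≤ 0) : pvConsume bs f = bs := by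
  induction bs with
  | nil => rfl
  | cons b t ih =>
      rw [pvConsume, if_neg, ih]
      rintro ⟨-, hpos⟩
      exact absurd (h b) (by omega)

theorem pvConsume_inc (bs : List (List String)) (f : List String → Int) (p : List String)
    (hp : p ∈ bs) (hl : p.length = 2) (hf : 0 ≤ f p) :
    pvConsume bs (pvInc f p) = pvConsume (bs.erase p) f := by
  induction bs generalizing f with
  | nil => cases hp
  | cons b t ih =>
      by_cases hb : b = p
      · subst hb
        rw [List.erase_cons_head]
        rw [pvConsume, if_pos ⟨hl, by simp [pvInc]; omega⟩]
        congr 1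
        funext q
        by_cases hq : q = b <;> simp [pvDec, pvInc, hq]
      · rw [List.erase_cons_tail (by simpa using hb)]
        have hpt : p ∈ t := by
          rcases List.mem_cons.mp hp with h | h
          · exact absurd h.symm hb
          · exact h
        have hincb : pvInc f p b = f b := by simp [pvInc, hb]
        by_cases hc : b.length = 2 ∧ f b > 0
        · rw [pvConsume, if_pos ⟨hc.1, by rw [hincb]; exact hc.2⟩]
          rw [pvConsume, if_pos hc]
          have hcomm : pvDec (pvInc f p) b = pvInc (pvDec f b) p := by
            funext q
            by_cases hq : q = p
            · subst hq; simp [pvDec, pvInc, Ne.symm hb]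
            · by_cases hq2 : q = b
              · subst hq2; simp [pvDec, pvInc, hq]
              · simp [pvDec, pvInc, hq, hq2]
          rw [hcomm, ih _ hpt (by simpa [pvDec, Ne.symm hb] using hf)]
        · rw [pvConsume, if_neg (by rw [hincb]; exact hc)]
          rw [pvConsume, if_neg hc, ih _ hpt hf]

-- getD after B's two count increments
theorem pvGetD2 (d : PySem.Dict (List String) Int) (k1 k2 p : List String) :
    ((d.insert k1 (d.getD k1 0 + 1)).insert k2 ((d.insert k1 (d.getD k1 0 + 1)).getD k2 0 + 1)).getD p 0
      = d.getD p 0 + (if p = k1 then 1 else 0) + (if p = k2 then 1 else 0) := by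
  simp only [PySem.Dict.getD_insert]
  by_cases h2 : p = k2 <;> by_cases h1 : p = k1
  · subst h2; subst h1; simp
  · subst h2; simp [h1]
  · subst h1; simp [h2]
  · simp [h1, h2]

-- counting in a two-element prefix (Nat and Int forms)
theorem pvCount2 (k1 k2 p : List String) (l : List (List String)) :
    (k1 :: k2 :: l).count p = l.count p + (if p = k1 then 1 else 0) + (if p = k2 then 1 else 0) := by
  by_cases h1 : p = k1 <;> by_cases h2 : p = k2 <;>
    simp [List.count_cons, h1, h2] <;> simp_all [eq_comm] <;> omega

theorem pvCount2Int (k1 k2 p : List String) (l : List (List String)) :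
    ((k1 :: k2 :: l).count p : Int) = (l.count p : Int) + (if p = k1 then 1 else 0) + (if p = k2 then 1 else 0) := by
  rw [pvCount2]
  by_cases h1 : p = k1 <;> by_cases h2 : p = k2 <;> simp [h1, h2] <;> push_cast <;> omega

-- counting after erasing the two consumed pairs
theorem pvCountErase2 (k1 k2 p : List String) (l : List (List String)) :
    ((l.erase k1).erase k2).count p
      = l.count p - ((if p = k1 then 1 else 0) + (if p = k2 then 1 else 0)) := by
  rw [List.count_erase, List.count_erase]
  simp only [beq_iff_eq]
  split_ifs <;> subst_eqs <;> first | omega | simp_all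

-- generic shape of A's combined_phrases loops
theorem pvFoldIfApp {α β : Type} (P : α → Prop) [DecidablePred P] (f : α → β)
    (l : List α) (acc : List β) :
    l.foldl (fun a x => if P x then a ++ [f x] else a) acc
      = acc ++ (l.filter (fun x => decide (P x))).map f := by
  induction l generalizing acc with
  | nil => simp
  | cons x xs ih =>
      by_cases h : P x
      · simp [List.foldl_cons, if_pos h, ih, List.filter_cons, h]
      · simp [List.foldl_cons, if_neg h, ih, List.filter_cons, h]

theorem mem_pvCombined (bigrams : List (List String)) (t : List String) :
    t ∈ pvCombined bigrams ↔
      ∃ b ∈ bigrams, ∃ o ∈ bigrams, pvAt b 1 = pvAt o 0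
        ∧ t = [pvAt b 0, pvAt b 1, pvAt o 1] := by
  unfold pvCombined
  have hfun : (fun (acc : List (List String)) (bigram : List String) =>
      (PySem.Set.ofList bigrams).foldl (fun acc2 other_bigram =>
        if pvAt bigram 1 = pvAt other_bigram 0 then
          acc2 ++ [[pvAt bigram 0, pvAt bigram 1, pvAt other_bigram 1]]
        else acc2) acc)
      = (fun acc bigram => acc ++
          (((PySem.Set.ofList bigrams).filter (fun o => decide (pvAt bigram 1 = pvAt o 0))).map
            (fun o => [pvAt bigram 0, pvAt bigram 1, pvAt o 1]))) := by
    funext acc bigram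
    exact pvFoldIfApp _ _ _ _
  rw [hfun, PySem.List.foldl_append_eq_flatMap]
  simp only [List.nil_append, List.mem_flatMap, List.mem_map, List.mem_filter,
    PySem.Set.mem_ofList, decide_eq_true_eq]
  constructor
  · rintro ⟨b, hb, o, ⟨ho, heq⟩, rfl⟩
    exact ⟨b, hb, o, ho, heq, rfl⟩
  · rintro ⟨b, hb, o, ho, heq, rfl⟩
    exact ⟨b, hb, o, ⟨ho, heq⟩, rfl⟩

theorem pvAt_triple (a b c : String) : pvAt [a, b, c] 0 = a ∧ pvAt [a, b, c] 1 = b ∧ pvAt [a, b, c] 2 = c := by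
  refine ⟨?_, ?_, ?_⟩ <;> simp [pvAt, PySem.List.pyGetD, PySem.List.pyGet?, PySem.List.pyIdx?]

-- A's membership test in combined_phrases IS B's matched condition
theorem pvCond_eq (bigrams : List (List String)) (t : List String) :
    (PySem.Set.ofList (pvCombined bigrams)).contains t = pvMatched bigrams t := by
  rw [Bool.eq_iff_iff]
  rw [show ((PySem.Set.ofList (pvCombined bigrams)).contains t = true) ↔ t ∈ pvCombined bigrams from
    by rw [PySem.Set.contains_iff, PySem.Set.mem_ofList]]
  rw [mem_pvCombined]
  simp only [pvMatched, Bool.and_eq_true, decide_eq_true_eq, List.contains_iff_mem, List.mem_map]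
  constructor
  · rintro ⟨b, hb, o, ho, heq, rfl⟩
    obtain ⟨h0, h1, h2⟩ := pvAt_triple (pvAt b 0) (pvAt b 1) (pvAt o 1)
    refine ⟨⟨by simp, ⟨b, hb, ?_⟩⟩, ⟨o, ho, ?_⟩⟩
    · rw [h0, h1]
    · rw [h1, h2, heq]
  · rintro ⟨⟨hlen, ⟨b, hb, hpb⟩⟩, ⟨o, ho, hpo⟩⟩
    rcases t with _ | ⟨x, _ | ⟨y, _ | ⟨z, _ | _⟩⟩⟩ <;> simp only [List.length] at hlen <;> try omega
    obtain ⟨h0, h1, h2⟩ := pvAt_triple x y z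
    rw [h0, h1] at hpb
    rw [h1, h2] at hpo
    simp only [List.cons.injEq, and_true] at hpb hpo
    obtain ⟨hb0, hb1⟩ := hpb
    obtain ⟨ho0, ho1⟩ := hpo
    exact ⟨b, hb, o, ho, by rw [hb1, ho0], by rw [hb0, hb1, ho1]⟩

-- B's first loop: the merged list is a filter, the need dict holds the pair counts
theorem pvFoldNeed (bigrams : List (List String)) (ts : List (List String))
    (d : PySem.Dict (List String) Int) (acc : List (List String)) :
    (ts.foldl (pvStepNeed (PySem.Set.ofList (bigrams.map (fun b => [pvAt b 0, pvAt b 1])))) (d, acc)).2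
        = acc ++ ts.filter (pvMatched bigrams)
    ∧ ∀ p, (ts.foldl (pvStepNeed (PySem.Set.ofList (bigrams.map (fun b => [pvAt b 0, pvAt b 1])))) (d, acc)).1.getD p 0
        = d.getD p 0 + (((ts.filter (pvMatched bigrams)).flatMap
            (fun t => [[pvAt t 0, pvAt t 1], [pvAt t 1, pvAt t 2]])).count p : Int) := by
  induction ts generalizing d acc with
  | nil => simp
  | cons t ts ih =>
      have hcond : (decide (t.length = 3)
          && (PySem.Set.ofList (bigrams.map (fun b => [pvAt b 0, pvAt b 1]))).contains [pvAt t 0, pvAt t 1]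
          && (PySem.Set.ofList (bigrams.map (fun b => [pvAt b 0, pvAt b 1]))).contains [pvAt t 1, pvAt t 2])
          = pvMatched bigrams t := by
        unfold pvMatched
        congr 1
        · congr 1
          · rw [Bool.eq_iff_iff, PySem.Set.contains_iff, PySem.Set.mem_ofList, List.contains_iff_mem]
        · rw [Bool.eq_iff_iff, PySem.Set.contains_iff, PySem.Set.mem_ofList, List.contains_iff_mem]
      rw [List.foldl_cons]
      by_cases hm : pvMatched bigrams t = true
      · rw [show pvStepNeed (PySem.Set.ofList (bigrams.map (fun b => [pvAt b 0, pvAt b 1]))) (d, acc) t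
            = (let need1 := d.insert [pvAt t 0, pvAt t 1] (d.getD [pvAt t 0, pvAt t 1] 0 + 1)
               (need1.insert [pvAt t 1, pvAt t 2] (need1.getD [pvAt t 1, pvAt t 2] 0 + 1), acc ++ [t]))
          from by unfold pvStepNeed; rw [hcond, if_pos hm]]
        obtain ⟨ih1, ih2⟩ := ih _ _
        refine ⟨?_, ?_⟩
        · rw [ih1]; simp [List.filter_cons, hm]
        · intro p
          rw [ih2 p, pvGetD2]
          have hfc : (t :: ts).filter (pvMatched bigrams) = t :: ts.filter (pvMatched bigrams) := by
            simp [List.filter_cons, hm]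
          rw [hfc]
          simp only [List.flatMap_cons, List.cons_append, List.nil_append]
          rw [pvCount2Int]
          ring
      · rw [show pvStepNeed (PySem.Set.ofList (bigrams.map (fun b => [pvAt b 0, pvAt b 1]))) (d, acc) t = (d, acc)
          from by unfold pvStepNeed; rw [hcond, if_neg hm]]
        obtain ⟨ih1, ih2⟩ := ih d acc
        exact ⟨by rw [ih1]; simp [List.filter_cons, hm], by
          intro p; rw [ih2 p]; simp [List.filter_cons, hm]⟩

-- B's second loop is pvConsume
theorem pvFoldKept (bs : List (List String)) (d : PySem.Dict (List String) Int)
    (acc : List (List String)) :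
    (bs.foldl pvStepKept (d, acc)).2 = acc ++ pvConsume bs (fun p => d.getD p 0) := by
  induction bs generalizing d acc with
  | nil => simp [pvConsume]
  | cons b t ih =>
      rw [List.foldl_cons]
      by_cases hc : b.length = 2 ∧ d.getD b 0 > 0
      · rw [show pvStepKept (d, acc) b = (d.insert b (d.getD b 0 - 1), acc) from by
          unfold pvStepKept; rw [if_pos (by simp [hc.1, hc.2])]]
        rw [ih]
        rw [pvConsume, if_pos hc]
        congr 2
        funext q
        rw [PySem.Dict.getD_insert]
        by_cases hq : q = b <;> simp [pvDec, hq]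
      · rw [show pvStepKept (d, acc) b = (d, acc ++ [b]) from by
          unfold pvStepKept
          rw [if_neg ?_]
          simp only [Bool.and_eq_true, decide_eq_true_eq]
          exact fun h => hc ⟨h.1, h.2⟩]
        rw [ih, pvConsume, if_neg hc]
        simp

-- a two-pair availability bound gives membership of both pairs and the count bound
-- after erasing them
theorem pvTwoMem (rem : List (List String)) (p1 p2 : List String) (cnt : List String → Nat)
    (hav : ∀ p, cnt p + (if p = p1 then 1 else 0) + (if p = p2 then 1 else 0) ≤ rem.count p) :
    p1 ∈ rem ∧ p2 ∈ rem.erase p1 ∧ ∀ p, cnt p ≤ ((rem.erase p1).erase p2).count p := by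
  have h1 : p1 ∈ rem := by
    have := hav p1
    rw [← List.count_pos_iff]
    simp at this
    omega
  refine ⟨h1, ?_, ?_⟩
  · have h := hav p2
    rw [← List.count_pos_iff, List.count_erase]
    by_cases he : p2 = p1
    · subst he
      simp at h ⊢
      omega
    · have hif : (if (p1 == p2) = true then 1 else 0) = 0 := by simp [Ne.symm he]
      rw [hif]
      simp [he] at h
      omega
  · intro p
    rw [pvCountErase2]
    have := hav p
    by_cases hq1 : p = p1 <;> by_cases hq2 : p = p2 <;> simp [hq1, hq2] at this ⊢ <;> omega

-- the main invariant: A's trigram loop, started from rem ++ app, consumes counted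
-- first occurrences from rem and appends the matched trigrams
theorem pvMainA (bigrams : List (List String)) (ts rem app : List (List String))
    (hav : ∀ p, (((ts.filter (pvMatched bigrams)).flatMap
        (fun t => [[pvAt t 0, pvAt t 1], [pvAt t 1, pvAt t 2]])).count p) ≤ rem.count p) :
    ts.foldl (pvStepA (pvCombined bigrams)) (rem ++ app)
      = pvConsume rem (fun p => (((ts.filter (pvMatched bigrams)).flatMap
          (fun t => [[pvAt t 0, pvAt t 1], [pvAt t 1, pvAt t 2]])).count p : Int))
        ++ app ++ ts.filter (pvMatched bigrams) := by
  induction ts generalizing rem app with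
  | nil =>
      simp only [List.foldl_nil, List.filter_nil, List.flatMap_nil, List.count_nil,
        List.append_nil]
      rw [pvConsume_nonpos _ _ (fun b => by simp)]
  | cons t ts ih =>
      rw [List.foldl_cons]
      by_cases hm : pvMatched bigrams t = true
      · have hfc : (t :: ts).filter (pvMatched bigrams) = t :: ts.filter (pvMatched bigrams) := by
          simp [List.filter_cons, hm]
        have hflat : ((t :: ts).filter (pvMatched bigrams)).flatMap
              (fun t => [[pvAt t 0, pvAt t 1], [pvAt t 1, pvAt t 2]])
            = [pvAt t 0, pvAt t 1] :: [pvAt t 1, pvAt t 2] ::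
                (ts.filter (pvMatched bigrams)).flatMap
                  (fun t => [[pvAt t 0, pvAt t 1], [pvAt t 1, pvAt t 2]]) := by
          rw [hfc]
          simp
        have hav' : ∀ p, ((ts.filter (pvMatched bigrams)).flatMap
              (fun t => [[pvAt t 0, pvAt t 1], [pvAt t 1, pvAt t 2]])).count p
              + (if p = [pvAt t 0, pvAt t 1] then 1 else 0)
              + (if p = [pvAt t 1, pvAt t 2] then 1 else 0) ≤ rem.count p := by
          intro p
          have h := hav p
          rw [hflat, pvCount2] at h
          exact h
        obtain ⟨hp1mem, hp2mem, hav2⟩ := pvTwoMem rem _ _ _ hav'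
        have hstep : pvStepA (pvCombined bigrams) (rem ++ app) t
            = ((rem.erase [pvAt t 0, pvAt t 1]).erase [pvAt t 1, pvAt t 2]) ++ (app ++ [t]) := by
          unfold pvStepA
          rw [pvCond_eq, if_pos hm]
          have hr1 : PySem.List.remove? (rem ++ app ++ [t]) [pvAt t 0, pvAt t 1]
              = some (rem.erase [pvAt t 0, pvAt t 1] ++ (app ++ [t])) := by
            rw [List.append_assoc,
              PySem.List.remove?_eq_some_erase _ _ (List.mem_append_left _ hp1mem),
              List.erase_append_left _ hp1mem]
          have hr2 : PySem.List.remove? (rem.erase [pvAt t 0, pvAt t 1] ++ (app ++ [t]))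
                [pvAt t 1, pvAt t 2]
              = some ((rem.erase [pvAt t 0, pvAt t 1]).erase [pvAt t 1, pvAt t 2] ++ (app ++ [t])) := by
            rw [PySem.List.remove?_eq_some_erase _ _ (List.mem_append_left _ hp2mem),
              List.erase_append_left _ hp2mem]
          simp only [hr1, Option.getD_some, hr2]
        rw [hstep, ih _ _ hav2]
        have hfun : (fun p => ((((t :: ts).filter (pvMatched bigrams)).flatMap
              (fun t => [[pvAt t 0, pvAt t 1], [pvAt t 1, pvAt t 2]])).count p : Int))
            = pvInc (pvInc (fun p => (((ts.filter (pvMatched bigrams)).flatMap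
                  (fun t => [[pvAt t 0, pvAt t 1], [pvAt t 1, pvAt t 2]])).count p : Int))
                [pvAt t 1, pvAt t 2]) [pvAt t 0, pvAt t 1] := by
          funext q
          rw [hflat, pvCount2Int]
          simp only [pvInc]
          split_ifs <;> omega
        rw [hfun,
          pvConsume_inc _ _ _ hp1mem rfl (by simp only [pvInc]; split <;> positivity),
          pvConsume_inc _ _ _ hp2mem rfl (by positivity),
          hfc]
        simp
      · have hstep : pvStepA (pvCombined bigrams) (rem ++ app) t = rem ++ app := by
          unfold pvStepA
          rw [pvCond_eq, if_neg hm]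
        have hfc : (t :: ts).filter (pvMatched bigrams) = ts.filter (pvMatched bigrams) := by
          simp [List.filter_cons, hm]
        rw [hstep, hfc, ih _ _ (fun p => by have h := hav p; rwa [hfc] at h)]

theorem pvAltEq (bigrams trigrams : List (List String)) :
    merged_phrases_alt bigrams trigrams
      = pvConsume bigrams (fun p => ((pvUsed bigrams trigrams).count p : Int))
        ++ trigrams.filter (pvMatched bigrams) := by
  unfold merged_phrases_alt pvNM
  obtain ⟨h1, h2⟩ := pvFoldNeed bigrams trigrams PySem.Dict.empty []
  rw [pvFoldKept, h1]
  simp only [List.nil_append]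
  congr 1
  congr 1
  funext p
  rw [h2 p, PySem.Dict.getD_empty]
  simp [pvUsed]

-- ===== VERDICT (by name: the statement is the Claim_ definition above) =====
theorem merged_phrases_spec : Claim_equal_merged_phrases := by
  intro bigrams trigrams _ hpre
  unfold Spec_merged_phrases
  obtain ⟨-, h2⟩ := hpre
  have hav : ∀ p, (pvUsed bigrams trigrams).count p ≤ bigrams.count p := by
    intro p
    by_cases hp : p ∈ pvUsed bigrams trigrams
    · exact h2 p hp
    · rw [List.count_eq_zero_of_not_mem hp]; omega
  rw [pvAltEq]
  unfold merged_phrases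
  have h := pvMainA bigrams trigrams bigrams [] (by simpa [pvUsed] using hav)
  simp only [List.append_nil] at h
  rw [h]
  simp [pvUsed]
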